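-- pv_equiv track=rewrite | github.com/StrategyLogic/omen | src/omen/ingest/llm_ontology/founder_actor_enhancer.py | _find_founder_actor_id
-- ===== SOURCE A (Python) =====
-- from typing import Any
--
-- def _find_founder_actor_id(actors: list[dict[str, Any]]) -> str:
--     for actor in actors:
--         actor_id = str(actor.get("id") or "").strip()
--         actor_name = str(actor.get("name") or "").lower()
--         actor_role = str(actor.get("role") or "").lower()
--         actor_type = str(actor.get("type") or "").lower()
--         if not actor_id:
--             continue
--         if actor_role == "founder" or actor_type == "founder":
--             return actor_id
--         if "founder" in actor_name or "founder" in actor_id.lower():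
--             return actor_id
--     def _score(actor: dict[str, Any]) -> int:
--         actor_id = str(actor.get("id") or "").lower()
--         actor_name = str(actor.get("name") or "").lower()
--         actor_role = str(actor.get("role") or "").lower()
--         actor_type = str(actor.get("type") or "").lower()
--         score = 0
--         if actor_role == "founder" or actor_type == "founder":
--             score += 100
--         if "founder" in actor_name or "founder" in actor_id:
--             score += 80
--         if actor_type in {"company", "organization", "startup"}:
--             score += 40
--         if "team" in actor_name or "team" in actor_id:
--             score += 20
--         return score
--
--     if not actors:
--         return ""
--     best = max(actors, key=_score)
--     best_id = str(best.get("id") or "").strip()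
--     return best_id
-- ===== SOURCE B (Python) =====
-- def _find_founder_actor_id(actors):
--     best = None
--     best_score = 0
--     for actor in actors:
--         actor_id = str(actor.get("id") or "").strip()
--         name = str(actor.get("name") or "").lower()
--         role = str(actor.get("role") or "").lower()
--         typ = str(actor.get("type") or "").lower()
--         if actor_id and (role == "founder" or typ == "founder"
--                          or "founder" in name or "founder" in actor_id.lower()):
--             return actor_id
--         raw_id = str(actor.get("id") or "").lower()
--         score = ((100 if role == "founder" or typ == "founder" else 0)
--                  + (80 if "founder" in name or "founder" in raw_id else 0)
--                  + (40 if typ in ("company", "organization", "startup") else 0)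
--                  + (20 if "team" in name or "team" in raw_id else 0))
--         if best is None or score > best_score:
--             best = actor
--             best_score = score
--     if best is None:
--         return ""
--     return str(best.get("id") or "").strip()
-- ===== Notes on version B (the rewrite author's own statement) =====
-- stated objective: alternative
-- what changed: A's two passes (a find-first loop over founder matches, then a separate max over a heuristic score) are fused into one single pass that early-returns on the first founder match and otherwise tracks the running best-scoring actor (strict-> update so the first of equal scores wins, as max does), returning its stripped id at the end.
import Mathlib
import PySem

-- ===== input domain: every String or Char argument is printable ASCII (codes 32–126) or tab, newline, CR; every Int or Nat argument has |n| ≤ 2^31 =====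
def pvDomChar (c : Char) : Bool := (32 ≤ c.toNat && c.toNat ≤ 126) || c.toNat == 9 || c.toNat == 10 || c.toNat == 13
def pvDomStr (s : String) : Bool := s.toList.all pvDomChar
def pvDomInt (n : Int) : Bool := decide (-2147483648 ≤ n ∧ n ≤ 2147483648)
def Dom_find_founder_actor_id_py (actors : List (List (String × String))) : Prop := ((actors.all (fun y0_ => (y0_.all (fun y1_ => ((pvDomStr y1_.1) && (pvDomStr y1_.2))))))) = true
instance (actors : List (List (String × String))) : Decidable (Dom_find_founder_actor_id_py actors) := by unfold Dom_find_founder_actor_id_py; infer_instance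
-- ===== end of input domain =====

-- B fuses A's two passes (find-first loop, then a separate max over scores) into one pass that
-- early-returns on a founder match and otherwise tracks the running best-scoring actor (alternative decomposition).


-- ===== PORT A =====
-- str(actor.get(k) or ""): first-match lookup in the association list; missing key and
-- empty value both give "" (values are strings, so str() is the identity) — exact by hand
def pvGetA (actor : List (String × String)) (k : String) : String :=
  (actor.lookup k).getD ""

-- the first for-loop of A: some id = early 'return actor_id', none = loop fell through
def pvFindLoopA : List (List (String × String)) → Option String
  | [] => none
  | actor :: rest =>
    let actor_id := PySem.Str.strip (pvGetA actor "id")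
    let actor_name := PySem.Str.lower (pvGetA actor "name")
    let actor_role := PySem.Str.lower (pvGetA actor "role")
    let actor_type := PySem.Str.lower (pvGetA actor "type")
    if actor_id = "" then pvFindLoopA rest
    else if actor_role = "founder" ∨ actor_type = "founder" then some actor_id
    else if PySem.Str.isIn "founder" actor_name = true ∨
            PySem.Str.isIn "founder" (PySem.Str.lower actor_id) = true then some actor_id
    else pvFindLoopA rest

-- A's local _score, accumulator style as in the Python
def pvScoreA (actor : List (String × String)) : Int :=
  let actor_id := PySem.Str.lower (pvGetA actor "id")
  let actor_name := PySem.Str.lower (pvGetA actor "name")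
  let actor_role := PySem.Str.lower (pvGetA actor "role")
  let actor_type := PySem.Str.lower (pvGetA actor "type")
  let score : Int := 0
  let score := if actor_role = "founder" ∨ actor_type = "founder" then score + 100 else score
  let score := if PySem.Str.isIn "founder" actor_name = true ∨
                  PySem.Str.isIn "founder" actor_id = true then score + 80 else score
  let score := if actor_type = "company" ∨ actor_type = "organization" ∨ actor_type = "startup"
               then score + 40 else score
  let score := if PySem.Str.isIn "team" actor_name = true ∨
                  PySem.Str.isIn "team" actor_id = true then score + 20 else score
  score

def find_founder_actor_id_py (actors : List (List (String × String))) : String :=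
  match pvFindLoopA actors with
  | some actor_id => actor_id
  | none =>
    if actors = [] then ""
    else
      match PySem.List.max? actors pvScoreA with
      | some best => PySem.Str.strip (pvGetA best "id")
      | none => ""

-- ===== PORT B =====
def pvGetB (actor : List (String × String)) (k : String) : String :=
  (actor.lookup k).getD ""

-- B's heuristic score: a sum of four weighted tests
def pvScoreB (actor : List (String × String)) : Int :=
  let name := PySem.Str.lower (pvGetB actor "name")
  let role := PySem.Str.lower (pvGetB actor "role")
  let typ := PySem.Str.lower (pvGetB actor "type")
  let raw_id := PySem.Str.lower (pvGetB actor "id")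
  (if role = "founder" ∨ typ = "founder" then (100 : Int) else 0)
  + (if PySem.Str.isIn "founder" name = true ∨ PySem.Str.isIn "founder" raw_id = true then 80 else 0)
  + (if typ = "company" ∨ typ = "organization" ∨ typ = "startup" then 40 else 0)
  + (if PySem.Str.isIn "team" name = true ∨ PySem.Str.isIn "team" raw_id = true then 20 else 0)

-- B's single pass: best = none / some (actor, best_score); early return on a founder match
def pvLoopB : List (List (String × String)) → Option (List (String × String) × Int) → String
  | [], none => ""
  | [], some (best, _) => PySem.Str.strip (pvGetB best "id")
  | actor :: rest, best =>
    let actor_id := PySem.Str.strip (pvGetB actor "id")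
    let name := PySem.Str.lower (pvGetB actor "name")
    let role := PySem.Str.lower (pvGetB actor "role")
    let typ := PySem.Str.lower (pvGetB actor "type")
    if actor_id ≠ "" ∧ (role = "founder" ∨ typ = "founder" ∨
        PySem.Str.isIn "founder" name = true ∨
        PySem.Str.isIn "founder" (PySem.Str.lower actor_id) = true) then actor_id
    else
      let score := pvScoreB actor
      match best with
      | none => pvLoopB rest (some (actor, score))
      | some (b, bs) => if bs < score then pvLoopB rest (some (actor, score))
                        else pvLoopB rest (some (b, bs))

def find_founder_actor_id_py_alt (actors : List (List (String × String))) : String :=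
  pvLoopB actors none

-- ===== PRECONDITION & SPEC =====
def Spec_find_founder_actor_id_py (actors : List (List (String × String))) (out : String) : Prop := out = find_founder_actor_id_py_alt actors
instance (actors : List (List (String × String))) (out : String) : Decidable (Spec_find_founder_actor_id_py actors out) := by unfold Spec_find_founder_actor_id_py; infer_instance

-- ===== CLAIM (what is proved, stated in full; the proofs are below) =====
def Claim_equal_find_founder_actor_id_py : Prop := ∀ (actors : List (List (String × String))), Dom_find_founder_actor_id_py actors → Spec_find_founder_actor_id_py actors (find_founder_actor_id_py actors)

-- ===== LEMMAS AND PROOFS =====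

-- the two score helpers agree
theorem pvScore_eq (actor : List (String × String)) : pvScoreA actor = pvScoreB actor := by
  unfold pvScoreA pvScoreB pvGetA pvGetB
  dsimp only
  split_ifs <;> norm_num

-- B's best-tracking step, as a fold step
def pvStepB (acc : Option (List (String × String) × Int)) (actor : List (String × String)) :
    Option (List (String × String) × Int) :=
  let score := pvScoreB actor
  match acc with
  | none => some (actor, score)
  | some (b, bs) => if bs < score then some (actor, score) else some (b, bs)

def pvFinishB : Option (List (String × String) × Int) → String
  | none => ""
  | some (best, _) => PySem.Str.strip (pvGetB best "id")

-- B's loop = A's find-first loop, then finish the fold of the best-tracking step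
theorem pvLoopB_eq (actors : List (List (String × String)))
    (acc : Option (List (String × String) × Int)) :
    pvLoopB actors acc =
      match pvFindLoopA actors with
      | some id => id
      | none => pvFinishB (actors.foldl pvStepB acc) := by
  induction actors generalizing acc with
  | nil => cases acc with
    | none => rfl
    | some p => obtain ⟨b, bs⟩ := p; rfl
  | cons actor rest ih =>
    have hget : pvGetB = pvGetA := rfl
    simp only [pvLoopB, pvFindLoopA, hget, List.foldl_cons]
    by_cases hid : PySem.Str.strip (pvGetA actor "id") = ""
    · -- empty id: no early return on either side
      rw [if_neg (by simp [hid]), if_pos hid]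
      cases acc with
      | none => rw [ih]; rfl
      | some p =>
        obtain ⟨b, bs⟩ := p
        dsimp only
        by_cases hlt : bs < pvScoreB actor
        · rw [if_pos hlt, ih]
          simp only [pvStepB, if_pos hlt]
        · rw [if_neg hlt, ih]
          simp only [pvStepB, if_neg hlt]
    · by_cases hc : PySem.Str.lower (pvGetA actor "role") = "founder" ∨
          PySem.Str.lower (pvGetA actor "type") = "founder" ∨
          PySem.Str.isIn "founder" (PySem.Str.lower (pvGetA actor "name")) = true ∨
          PySem.Str.isIn "founder"
            (PySem.Str.lower (PySem.Str.strip (pvGetA actor "id"))) = true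
      · -- early return on both sides
        rw [if_pos ⟨hid, hc⟩, if_neg hid]
        by_cases h1 : PySem.Str.lower (pvGetA actor "role") = "founder" ∨
            PySem.Str.lower (pvGetA actor "type") = "founder"
        · rw [if_pos h1]
        · have h2 : PySem.Str.isIn "founder" (PySem.Str.lower (pvGetA actor "name")) = true ∨
              PySem.Str.isIn "founder"
                (PySem.Str.lower (PySem.Str.strip (pvGetA actor "id"))) = true := by
            rcases hc with h | h | h | h
            · exact absurd (Or.inl h) h1
            · exact absurd (Or.inr h) h1
            · exact Or.inl h
            · exact Or.inr h
          rw [if_neg h1, if_pos h2]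
      · -- no early return
        push Not at hc
        obtain ⟨h1, h2, h3, h4⟩ := hc
        have hng : ¬ (PySem.Str.strip (pvGetA actor "id") ≠ "" ∧
            (PySem.Str.lower (pvGetA actor "role") = "founder" ∨
             PySem.Str.lower (pvGetA actor "type") = "founder" ∨
             PySem.Str.isIn "founder" (PySem.Str.lower (pvGetA actor "name")) = true ∨
             PySem.Str.isIn "founder"
               (PySem.Str.lower (PySem.Str.strip (pvGetA actor "id"))) = true)) := by
          rintro ⟨-, h | h | h | h⟩
          exacts [h1 h, h2 h, h3 h, h4 h]
        have hn1 : ¬ (PySem.Str.lower (pvGetA actor "role") = "founder" ∨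
            PySem.Str.lower (pvGetA actor "type") = "founder") := by
          rintro (h | h); exacts [h1 h, h2 h]
        have hn2 : ¬ (PySem.Str.isIn "founder" (PySem.Str.lower (pvGetA actor "name")) = true ∨
            PySem.Str.isIn "founder"
              (PySem.Str.lower (PySem.Str.strip (pvGetA actor "id"))) = true) := by
          rintro (h | h); exacts [h3 h, h4 h]
        rw [if_neg hng, if_neg hid, if_neg hn1, if_neg hn2]
        cases acc with
        | none => rw [ih]; rfl
        | some p =>
          obtain ⟨b, bs⟩ := p
          dsimp only
          by_cases hlt : bs < pvScoreB actor
          · rw [if_pos hlt, ih]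
            simp only [pvStepB, if_pos hlt]
          · rw [if_neg hlt, ih]
            simp only [pvStepB, if_neg hlt]

-- the fold of the best-tracking step carries the running-best actor and its score
theorem pvFoldB_eq (t : List (List (String × String))) (b : List (String × String)) :
    t.foldl pvStepB (some (b, pvScoreB b)) =
      some (t.foldl (fun acc y => if pvScoreB acc < pvScoreB y then y else acc) b,
            pvScoreB (t.foldl (fun acc y => if pvScoreB acc < pvScoreB y then y else acc) b)) := by
  induction t generalizing b with
  | nil => rfl
  | cons y t ih =>
    simp only [List.foldl_cons, pvStepB]
    split_ifs with h
    · rw [ih]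
    · rw [ih]

-- A's max? is the running-max fold (first extremal wins)
theorem pvMax?_eq (b : List (String × String)) (t : List (List (String × String))) :
    PySem.List.max? (b :: t) pvScoreA =
      some (t.foldl (fun acc y => if pvScoreA acc < pvScoreA y then y else acc) b) := by
  simp only [PySem.List.max?]
  induction t generalizing b with
  | nil => rfl
  | cons y t ih =>
    simp only [List.foldl_cons]
    split_ifs with h <;> exact ih _

-- ===== VERDICT (by name: the statement is the Claim_ definition above) =====
theorem find_founder_actor_id_py_spec : Claim_equal_find_founder_actor_id_py := by
  intro actors _
  unfold Spec_find_founder_actor_id_py find_founder_actor_id_py find_founder_actor_id_py_alt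
  rw [pvLoopB_eq]
  cases hA : pvFindLoopA actors with
  | some id => rfl
  | none =>
    cases actors with
    | nil => rfl
    | cons a t =>
      rw [if_neg (by simp), pvMax?_eq]
      have hsc : (fun acc y => if pvScoreA acc < pvScoreA y then y else acc) =
          (fun (acc y : List (String × String)) => if pvScoreB acc < pvScoreB y then y else acc) := by
        funext acc y; rw [pvScore_eq, pvScore_eq]
      have hfold : (a :: t).foldl pvStepB none = t.foldl pvStepB (some (a, pvScoreB a)) := rfl
      rw [hfold, pvFoldB_eq, hsc]
      simp [pvFinishB, pvGetA, pvGetB]
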